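-- pv_equiv track=rewrite | github.com/ldy9037/python-algorithm | algorithm-lv5/q1.py | solution
-- ===== SOURCE A (Python) =====
-- from collections import defaultdict
--
-- def solution(arrows):
--     answer = 0
--
--     move = [(0, 1), (1, 1), (1, 0), (1, -1), (0, -1), (-1, -1), (-1, 0), (-1, 1)]
--     graph = defaultdict(list)
--
--     current = (0, 0)
--     for arrow in arrows:
--         for i in range(2):
--
--             x, y = current
--             next_vertex = (x + move[arrow][0], y + move[arrow][1])
--             if not arrow in graph[current]:
--                 graph[current].append(arrow)
--
--                 if graph[next_vertex]:
--                     answer += 1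
--
--                 opposite_arrow = arrow + 4 if arrow < 4 else arrow - 4
--                 graph[next_vertex].append(opposite_arrow)
--
--             current = next_vertex
--
--     return answer
-- ===== SOURCE B (Python) =====
-- def solution(arrows):
--     move = [(0, 1), (1, 1), (1, 0), (1, -1), (0, -1), (-1, -1), (-1, 0), (-1, 1)]
--     cur = (0, 0)
--     vertices = {cur}
--     edges = set()
--     for arrow in arrows:
--         dx, dy = move[arrow]
--         for _ in range(2):
--             nxt = (cur[0] + dx, cur[1] + dy)
--             vertices.add(nxt)
--             edges.add((min(cur, nxt), max(cur, nxt)))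
--             cur = nxt
--     if not edges:
--         return 0
--     return len(edges) - len(vertices) + 1
-- ===== Notes on version B (the rewrite author's own statement) =====
-- stated objective: simpler
-- what changed: B drops A's labeled adjacency dict and online counting: it walks the same doubled-resolution path accumulating a visited-vertex set and an undirected-edge set, and returns the cyclomatic number len(edges)-len(vertices)+1 (0 when there are no edges).
-- outside the precondition, e.g. on solution([0, -4]): A returns 2, B returns 0
import Mathlib
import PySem

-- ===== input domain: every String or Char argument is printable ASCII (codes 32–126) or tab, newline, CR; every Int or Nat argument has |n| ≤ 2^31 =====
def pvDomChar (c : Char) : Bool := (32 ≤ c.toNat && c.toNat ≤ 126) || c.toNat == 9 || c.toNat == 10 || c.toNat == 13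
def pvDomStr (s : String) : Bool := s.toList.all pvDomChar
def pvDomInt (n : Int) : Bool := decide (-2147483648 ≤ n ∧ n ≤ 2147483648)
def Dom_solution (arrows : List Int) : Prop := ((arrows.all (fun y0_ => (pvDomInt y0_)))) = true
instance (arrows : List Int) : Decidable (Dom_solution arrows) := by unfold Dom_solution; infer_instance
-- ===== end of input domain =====

-- B replaces A's labeled adjacency dict and online cycle counting with a vertex set and an
-- undirected-edge set accumulated along the same walk, returning |E| - |V| + 1 (0 if no edges);
-- objective: simpler.

-- ===== PORT A =====
def pvMove : List (Int × Int) :=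
  [(0, 1), (1, 1), (1, 0), (1, -1), (0, -1), (-1, -1), (-1, 0), (-1, 1)]

-- one iteration of the inner `for i in range(2)` body
-- (`graph[current]` on a defaultdict is read here only via membership / truthiness / append,
-- so the read is ported as `getD _ []`: the empty entry defaultdict would create is invisible)
def pvStepA (st : Int × (Int × Int) × PySem.Dict (Int × Int) (List Int)) (arrow : Int) :
    Int × (Int × Int) × PySem.Dict (Int × Int) (List Int) :=
  let answer := st.1
  let current := st.2.1
  let graph := st.2.2
  match PySem.List.pyGet? pvMove arrow with
  | none => st   -- IndexError in Python: excluded by Pre_solution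
  | some m =>
    let next := (current.1 + m.1, current.2 + m.2)
    if (graph.getD current []).contains arrow then
      (answer, next, graph)
    else
      let graph1 := graph.insert current ((graph.getD current []) ++ [arrow])
      let answer1 := if (graph1.getD next []) ≠ [] then answer + 1 else answer
      let opp := if arrow < 4 then arrow + 4 else arrow - 4
      let graph2 := graph1.insert next ((graph1.getD next []) ++ [opp])
      (answer1, next, graph2)

def solution (arrows : List Int) : Int :=
  (arrows.foldl
    (fun st arrow => (List.range 2).foldl (fun st _ => pvStepA st arrow) st)
    (0, (0, 0), PySem.Dict.empty)).1

-- ===== PORT B =====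
-- Python tuple comparison on pairs of ints is lexicographic
def pvLexLe (p q : Int × Int) : Bool := p.1 < q.1 || (p.1 == q.1 && p.2 ≤ q.2)

-- (min(p,q), max(p,q)) — the undirected-edge key
def pvSortPair (p q : Int × Int) : (Int × Int) × (Int × Int) :=
  if pvLexLe p q then (p, q) else (q, p)

def pvStepB (m : Int × Int)
    (st : (Int × Int) × PySem.Set (Int × Int) × PySem.Set ((Int × Int) × (Int × Int))) (_i : Nat) :
    (Int × Int) × PySem.Set (Int × Int) × PySem.Set ((Int × Int) × (Int × Int)) :=
  let cur := st.1
  let nxt := (cur.1 + m.1, cur.2 + m.2)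
  (nxt, PySem.Set.add st.2.1 nxt, PySem.Set.add st.2.2 (pvSortPair cur nxt))

def solution_alt (arrows : List Int) : Int :=
  let st := arrows.foldl
    (fun st arrow =>
      match PySem.List.pyGet? pvMove arrow with
      | none => st   -- IndexError in Python: excluded by Pre_solution
      | some m => (List.range 2).foldl (pvStepB m) st)
    (((0, 0) : Int × Int), PySem.Set.ofList [((0, 0) : Int × Int)],
      (PySem.Set.empty : PySem.Set ((Int × Int) × (Int × Int))))
  if st.2.2 = [] then 0
  else (st.2.2.length : Int) - (st.2.1.length : Int) + 1

-- ===== PRECONDITION & SPEC =====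
-- Pre_ restricts to the problem's natural input domain, direction codes 0–7: outside [-8,8) A
-- raises IndexError, and on the malformed negative codes -8..-1 A's value comes from Python's
-- negative-index wraparound combined with mismatched opposite labels (the same geometric edge
-- can be counted twice), which B does not mimic.
def Pre_solution (arrows : List Int) : Prop :=
  ∀ a ∈ arrows, 0 ≤ a ∧ a < 8
instance (arrows : List Int) : Decidable (Pre_solution arrows) := by
  unfold Pre_solution; infer_instance

def pvWitness_solution : List Int := [6, 6, 6, 4, 4, 4, 2, 2, 2, 0, 0, 0]

def Spec_solution (arrows : List Int) (out : Int) : Prop := out = solution_alt arrows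
instance (arrows : List Int) (out : Int) : Decidable (Spec_solution arrows out) := by
  unfold Spec_solution; infer_instance

-- ===== CLAIM (what is proved, stated in full; the proofs are below) =====
def Claim_equal_solution : Prop :=
  ∀ (arrows : List Int), Dom_solution arrows → Pre_solution arrows →
    Spec_solution arrows (solution arrows)

-- ===== LEMMAS AND PROOFS =====

-- readable views used only by the proofs
def pvGl (g : PySem.Dict (Int × Int) (List Int)) (v : Int × Int) : List Int := g.getD v []

def pvMv (a : Int) : Int × Int :=
  if a = 0 then (0, 1) else if a = 1 then (1, 1) else if a = 2 then (1, 0)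
  else if a = 3 then (1, -1) else if a = 4 then (0, -1) else if a = 5 then (-1, -1)
  else if a = 6 then (-1, 0) else (-1, 1)

def pvOpp (a : Int) : Int := if a < 4 then a + 4 else a - 4

def pvVAdd (v m : Int × Int) : Int × Int := (v.1 + m.1, v.2 + m.2)

lemma pvCases8 {a : Int} (h0 : 0 ≤ a) (h8 : a < 8) :
    a = 0 ∨ a = 1 ∨ a = 2 ∨ a = 3 ∨ a = 4 ∨ a = 5 ∨ a = 6 ∨ a = 7 := by omega

lemma pvGet_pvMove {a : Int} (h0 : 0 ≤ a) (h8 : a < 8) :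
    PySem.List.pyGet? pvMove a = some (pvMv a) := by
  rcases pvCases8 h0 h8 with h|h|h|h|h|h|h|h <;> subst h <;> decide

lemma pvMv_ne_zero {a : Int} (h0 : 0 ≤ a) (h8 : a < 8) : pvMv a ≠ (0, 0) := by
  rcases pvCases8 h0 h8 with h|h|h|h|h|h|h|h <;> subst h <;> decide

lemma pvMv_inj {a b : Int} (ha0 : 0 ≤ a) (ha8 : a < 8) (hb0 : 0 ≤ b) (hb8 : b < 8)
    (h : pvMv a = pvMv b) : a = b := by
  rcases pvCases8 ha0 ha8 with h1|h1|h1|h1|h1|h1|h1|h1 <;> subst h1 <;>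
    rcases pvCases8 hb0 hb8 with h2|h2|h2|h2|h2|h2|h2|h2 <;> subst h2 <;> first | rfl | (exact absurd h (by decide))

lemma pvOpp_range {a : Int} (h0 : 0 ≤ a) (h8 : a < 8) : 0 ≤ pvOpp a ∧ pvOpp a < 8 := by
  unfold pvOpp; split <;> omega

lemma pvOpp_opp {a : Int} (h0 : 0 ≤ a) (h8 : a < 8) : pvOpp (pvOpp a) = a := by
  unfold pvOpp; split <;> split <;> omega

lemma pvMv_opp {a : Int} (h0 : 0 ≤ a) (h8 : a < 8) :
    pvMv (pvOpp a) = (-(pvMv a).1, -(pvMv a).2) := by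
  rcases pvCases8 h0 h8 with h|h|h|h|h|h|h|h <;> subst h <;> decide

lemma pvSortPair_symm (p q : Int × Int) : pvSortPair p q = pvSortPair q p := by
  obtain ⟨p1, p2⟩ := p; obtain ⟨q1, q2⟩ := q
  simp only [pvSortPair, pvLexLe]
  split_ifs with h1 h2 h2 <;>
    simp_all only [Bool.or_eq_true, Bool.and_eq_true, decide_eq_true_eq, beq_iff_eq,
      Prod.mk.injEq] <;> omega

lemma pvSortPair_cases {p q r s : Int × Int} (h : pvSortPair p q = pvSortPair r s) :
    (p = r ∧ q = s) ∨ (p = s ∧ q = r) := by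
  unfold pvSortPair at h
  split_ifs at h <;> simp only [Prod.mk.injEq] at h <;> tauto

-- small set facts
lemma pvSet_add_of_mem {α : Type} [BEq α] [LawfulBEq α] {s : PySem.Set α} {x : α} (h : x ∈ s) :
    PySem.Set.add s x = s := by
  simp [PySem.Set.add, PySem.Set.contains, h]

lemma pvSet_add_of_not_mem {α : Type} [BEq α] [LawfulBEq α] {s : PySem.Set α} {x : α} (h : ¬ x ∈ s) :
    PySem.Set.add s x = s ++ [x] := by
  simp [PySem.Set.add, PySem.Set.contains, h]

lemma pvSet_add_ne_nil {α : Type} [BEq α] [LawfulBEq α] (s : PySem.Set α) (x : α) :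
    PySem.Set.add s x ≠ [] := by
  by_cases h : x ∈ s
  · rw [pvSet_add_of_mem h]; exact List.ne_nil_of_mem h
  · rw [pvSet_add_of_not_mem h]; simp

-- the walk invariant tying A's state (answer, current, graph) to B's state (current, V, E)
def pvInv (sa : Int × (Int × Int) × PySem.Dict (Int × Int) (List Int))
    (sb : (Int × Int) × PySem.Set (Int × Int) × PySem.Set ((Int × Int) × (Int × Int))) : Prop :=
  sb.1 = sa.2.1 ∧
  sb.2.1.Nodup ∧ sb.2.2.Nodup ∧
  (∀ v b, b ∈ pvGl sa.2.2 v → (0 ≤ b ∧ b < 8) ∧ pvOpp b ∈ pvGl sa.2.2 (pvVAdd v (pvMv b))) ∧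
  (∀ e, e ∈ sb.2.2 ↔ ∃ v b, 0 ≤ b ∧ b < 8 ∧ b ∈ pvGl sa.2.2 v ∧ e = pvSortPair v (pvVAdd v (pvMv b))) ∧
  (∀ v, v ∈ sb.2.1 ↔ (v = (0, 0) ∨ pvGl sa.2.2 v ≠ [])) ∧
  (sa.2.1 = (0, 0) ∨ pvGl sa.2.2 sa.2.1 ≠ []) ∧
  (sa.2.1 ≠ (0, 0) → pvGl sa.2.2 (0, 0) ≠ []) ∧
  (sa.1 = (sb.2.2.length : Int) + 1 - (sb.2.1.length : Int)) ∧
  (sb.2.2 = [] → sb.2.1 = [(0, 0)])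

lemma pvStep_pres {a : Int} (h0 : 0 ≤ a) (h8 : a < 8)
    (sa : Int × (Int × Int) × PySem.Dict (Int × Int) (List Int))
    (sb : (Int × Int) × PySem.Set (Int × Int) × PySem.Set ((Int × Int) × (Int × Int)))
    (i : Nat) (h : pvInv sa sb) :
    pvInv (pvStepA sa a) (pvStepB (pvMv a) sb i) := by
  obtain ⟨ans, cur, g⟩ := sa
  obtain ⟨cur', V, E⟩ := sb
  obtain ⟨hc, hVn, hEn, hsym, hE, hV, hcur, h00, hans, hemp⟩ := h
  dsimp only at hc hsym hE hV hcur h00 hans hemp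
  subst cur'
  have hget := pvGet_pvMove h0 h8
  have hmv0 := pvMv_ne_zero h0 h8
  set m := pvMv a with hm
  set nxt : Int × Int := (cur.1 + m.1, cur.2 + m.2) with hnxtdef
  have hnxt_ne : nxt ≠ cur := by
    intro hq
    have h1 : cur.1 + m.1 = cur.1 := congrArg Prod.fst hq
    have h2 : cur.2 + m.2 = cur.2 := congrArg Prod.snd hq
    exact hmv0 (Prod.ext (by omega) (by omega))
  have hvadd : pvVAdd cur m = nxt := rfl
  unfold pvStepA pvStepB
  rw [hget]
  dsimp only
  simp only [← hnxtdef]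
  by_cases hmem : a ∈ pvGl g cur
  · -- arrow already recorded at current: A skips, B re-adds existing vertex and edge
    have hglnxt : pvGl g nxt ≠ [] := by
      have := (hsym cur a hmem).2
      rw [hvadd] at this
      exact List.ne_nil_of_mem this
    have hnV : nxt ∈ V := (hV nxt).mpr (Or.inr hglnxt)
    have heE : pvSortPair cur nxt ∈ E := (hE _).mpr ⟨cur, a, h0, h8, hmem, by rw [hvadd]⟩
    rw [if_pos (by simpa [pvGl, List.contains_iff_mem] using hmem)]
    rw [pvSet_add_of_mem hnV, pvSet_add_of_mem heE]
    refine ⟨rfl, hVn, hEn, hsym, hE, hV, Or.inr hglnxt, ?_, hans, hemp⟩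
    intro hne0
    by_cases hc0 : cur = (0, 0)
    · rw [← hc0]; exact List.ne_nil_of_mem hmem
    · exact h00 hc0
  · -- new edge: A records labels and counts, B gains the edge (and possibly the vertex)
    rw [if_neg (by simpa [pvGl, List.contains_iff_mem] using hmem)]
    have hg1 : (g.insert cur (g.getD cur [] ++ [a])).getD nxt [] = pvGl g nxt := by
      rw [PySem.Dict.getD_insert]
      simp [pvGl, hnxt_ne]
    rw [hg1]
    have hoppdef : (if a < 4 then a + 4 else a - 4) = pvOpp a := rfl
    rw [hoppdef]
    set e0 := pvSortPair cur nxt with he0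
    set g2 := (g.insert cur (g.getD cur [] ++ [a])).insert nxt (pvGl g nxt ++ [pvOpp a]) with hg2
    have hgl2 : ∀ v, pvGl g2 v =
        if v = nxt then pvGl g nxt ++ [pvOpp a]
        else if v = cur then pvGl g cur ++ [a]
        else pvGl g v := by
      intro v
      simp only [pvGl, hg2, PySem.Dict.getD_insert]
    have hmem2 : ∀ v b, b ∈ pvGl g2 v ↔
        b ∈ pvGl g v ∨ (v = cur ∧ b = a) ∨ (v = nxt ∧ b = pvOpp a) := by
      intro v b
      rw [hgl2]
      split_ifs with e1 e2
      · subst e1; simp [hnxt_ne, List.mem_append]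
      · subst e2; simp [e1, List.mem_append]
      · simp [e1, e2]
    have hsup : ∀ v b, b ∈ pvGl g v → b ∈ pvGl g2 v := by
      intro v b hb; rw [hmem2]; exact Or.inl hb
    have hvaddopp : pvVAdd nxt (pvMv (pvOpp a)) = cur := by
      rw [pvMv_opp h0 h8, ← hm]
      refine Prod.ext ?_ ?_ <;> simp [pvVAdd, hnxtdef]
    have henE : e0 ∉ E := by
      intro hin
      obtain ⟨v, b, hb0, hb8, hbm, heq⟩ := (hE _).mp hin
      have heq' : pvSortPair v (pvVAdd v (pvMv b)) = pvSortPair cur nxt := heq.symm.trans he0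
      rcases pvSortPair_cases heq' with ⟨h1, h2⟩ | ⟨h1, h2⟩
      · -- v = cur and v + mv b = nxt : then b = a, contradicting hmem
        rw [h1] at hbm h2
        have hba : b = a := by
          apply pvMv_inj hb0 hb8 h0 h8
          rw [← hm]
          have e1 : cur.1 + (pvMv b).1 = cur.1 + m.1 := congrArg Prod.fst h2
          have e2 : cur.2 + (pvMv b).2 = cur.2 + m.2 := congrArg Prod.snd h2
          exact Prod.ext (by omega) (by omega)
        rw [hba] at hbm
        exact hmem hbm
      · -- v = nxt and v + mv b = cur : then b = opp a, and symmetry puts a at cur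
        rw [h1] at hbm h2
        have hbop : b = pvOpp a := by
          apply pvMv_inj hb0 hb8 (pvOpp_range h0 h8).1 (pvOpp_range h0 h8).2
          rw [pvMv_opp h0 h8, ← hm]
          have e1 : nxt.1 + (pvMv b).1 = cur.1 := congrArg Prod.fst h2
          have e2 : nxt.2 + (pvMv b).2 = cur.2 := congrArg Prod.snd h2
          have f1 : nxt.1 = cur.1 + m.1 := by rw [hnxtdef]
          have f2 : nxt.2 = cur.2 + m.2 := by rw [hnxtdef]
          refine Prod.ext ?_ ?_ <;> dsimp <;> omega
        rw [hbop] at hbm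
        have := (hsym nxt (pvOpp a) hbm).2
        rw [hvaddopp, pvOpp_opp h0 h8] at this
        exact hmem this
    have hEadd : PySem.Set.add E e0 = E ++ [e0] := pvSet_add_of_not_mem henE
    refine ⟨rfl, PySem.Set.nodup_add V nxt hVn, PySem.Set.nodup_add E e0 hEn, ?_, ?_, ?_, ?_, ?_, ?_, ?_⟩
    · -- adjacency symmetry for g2
      intro v b hb
      rw [hmem2] at hb
      rcases hb with hb | ⟨rfl, rfl⟩ | ⟨rfl, rfl⟩
      · exact ⟨(hsym v b hb).1, hsup _ _ (hsym v b hb).2⟩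
      · refine ⟨⟨h0, h8⟩, ?_⟩
        rw [← hm, hvadd, hmem2]
        exact Or.inr (Or.inr ⟨rfl, rfl⟩)
      · refine ⟨pvOpp_range h0 h8, ?_⟩
        rw [hvaddopp, pvOpp_opp h0 h8, hmem2]
        exact Or.inr (Or.inl ⟨rfl, rfl⟩)
    · -- edge-set characterisation
      intro e
      rw [PySem.Set.mem_add]
      constructor
      · rintro (he | rfl)
        · obtain ⟨v, b, hb0, hb8, hbm, rfl⟩ := (hE e).mp he
          exact ⟨v, b, hb0, hb8, hsup _ _ hbm, rfl⟩
        · exact ⟨cur, a, h0, h8, (hmem2 cur a).mpr (Or.inr (Or.inl ⟨rfl, rfl⟩)), by rw [← hm, hvadd]⟩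
      · rintro ⟨v, b, hb0, hb8, hbm, rfl⟩
        rw [hmem2] at hbm
        rcases hbm with hb | ⟨rfl, rfl⟩ | ⟨rfl, rfl⟩
        · exact Or.inl ((hE _).mpr ⟨v, b, hb0, hb8, hb, rfl⟩)
        · right; rw [← hm, hvadd]
        · right; rw [hvaddopp, he0, pvSortPair_symm]
    · -- vertex-set characterisation
      intro v
      rw [PySem.Set.mem_add]
      constructor
      · rintro (hv | rfl)
        · rcases (hV v).mp hv with h | h
          · exact Or.inl h
          · refine Or.inr ?_
            obtain ⟨x, hx⟩ := List.exists_mem_of_ne_nil _ h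
            exact List.ne_nil_of_mem (hsup _ _ hx)
        · refine Or.inr ?_
          rw [hgl2]; simp
      · rintro (h | h)
        · exact Or.inl ((hV v).mpr (Or.inl h))
        · rw [hgl2] at h
          split_ifs at h with e1 e2
          · exact Or.inr e1
          · exact Or.inl ((hV v).mpr (e2 ▸ hcur))
          · exact Or.inl ((hV v).mpr (Or.inr h))
    · -- current vertex has a record
      refine Or.inr ?_
      rw [hgl2]; simp
    · -- the origin keeps a record once left
      intro hne0
      rw [hgl2]
      split_ifs with e1 e2
      · simp
      · simp
      · exact h00 (fun hcc => e2 hcc.symm)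
    · -- the count  answer = |E| + 1 - |V|
      by_cases hnn : pvGl g nxt = []
      · rw [if_neg (by simpa using hnn)]
        have hn0 : nxt ≠ (0, 0) := by
          intro hq
          have hcne : cur ≠ (0, 0) := fun hcc => hnxt_ne (hq.trans hcc.symm)
          exact h00 hcne (hq ▸ hnn)
        have hnV : nxt ∉ V := by
          intro hv
          rcases (hV nxt).mp hv with h | h
          · exact hn0 h
          · exact h hnn
        rw [hEadd, pvSet_add_of_not_mem hnV]
        simp only [List.length_append, List.length_cons, List.length_nil]
        push_cast
        omega
      · rw [if_pos (by simpa using hnn)]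
        have hnV : nxt ∈ V := (hV nxt).mpr (Or.inr hnn)
        rw [hEadd, pvSet_add_of_mem hnV]
        simp only [List.length_append, List.length_cons, List.length_nil]
        push_cast
        omega
    · -- edges nonempty after a step
      intro hq
      exact absurd hq (pvSet_add_ne_nil E e0)

lemma pvInv_init : pvInv (0, (0, 0), PySem.Dict.empty)
    ((0, 0), PySem.Set.ofList [((0, 0) : Int × Int)],
      (PySem.Set.empty : PySem.Set ((Int × Int) × (Int × Int)))) := by
  have hgl : ∀ v : Int × Int, pvGl PySem.Dict.empty v = [] := by
    intro v
    simp [pvGl, PySem.Dict.getD, PySem.Dict.get?, PySem.Dict.empty]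
  refine ⟨rfl, PySem.Set.nodup_ofList _, List.nodup_nil, ?_, ?_, ?_, Or.inl rfl, fun hq => absurd rfl hq, by decide, fun _ => rfl⟩
  · intro v b hb
    rw [hgl] at hb
    exact absurd hb (List.not_mem_nil)
  · intro e
    simp only [PySem.Set.empty, List.not_mem_nil, false_iff]
    rintro ⟨v, b, -, -, hb, -⟩
    rw [hgl] at hb
    exact absurd hb (List.not_mem_nil)
  · intro v
    rw [PySem.Set.mem_ofList, hgl]
    simp

lemma pvFold_pres (arrows : List Int) (hpre : ∀ x ∈ arrows, 0 ≤ x ∧ x < 8)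
    (sa : Int × (Int × Int) × PySem.Dict (Int × Int) (List Int))
    (sb : (Int × Int) × PySem.Set (Int × Int) × PySem.Set ((Int × Int) × (Int × Int)))
    (h : pvInv sa sb) :
    pvInv
      (arrows.foldl (fun st arrow => (List.range 2).foldl (fun st _ => pvStepA st arrow) st) sa)
      (arrows.foldl (fun st arrow =>
        match PySem.List.pyGet? pvMove arrow with
        | none => st
        | some m => (List.range 2).foldl (pvStepB m) st) sb) := by
  induction arrows generalizing sa sb with
  | nil => exact h
  | cons a rest ih =>
    have ha := hpre a (List.mem_cons_self ..)
    simp only [List.foldl_cons]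
    rw [pvGet_pvMove ha.1 ha.2]
    exact ih (fun x hx => hpre x (List.mem_cons_of_mem _ hx)) _ _
      (pvStep_pres ha.1 ha.2 _ _ 1 (pvStep_pres ha.1 ha.2 _ _ 0 h))

-- ===== VERDICT (by name: the statement is the Claim_ definition above) =====
theorem solution_spec : Claim_equal_solution := by
  intro arrows _ hpre
  unfold Spec_solution solution solution_alt
  obtain ⟨-, -, -, -, -, -, -, -, hans, hemp⟩ :=
    pvFold_pres arrows hpre (0, (0, 0), PySem.Dict.empty)
      ((0, 0), PySem.Set.ofList [((0, 0) : Int × Int)],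
        (PySem.Set.empty : PySem.Set ((Int × Int) × (Int × Int)))) pvInv_init
  dsimp only
  split_ifs with he
  · rw [hans, he, hemp he]
    simp
  · rw [hans]
    omega
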